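-- pv_equiv track=rewrite | github.com/minnseong/Algorithm | programmers/Test/LINE_Q5.py | solution
-- ===== SOURCE A (Python) =====
-- def solution(abilities, k):
--
--     result = 0
--
--     if len(abilities) & 1:
--         abilities.append(0)
--
--     abilities.sort(reverse=True)
--
--     diff = []
--     for i in range(0, len(abilities), 2):
--         diff.append([i//2+1, abs(abilities[i+1]-abilities[i])])
--
--     diff.sort(key=lambda x: -x[1])
--
--
--     select_round = set()
--     for idx in range(k):
--         select_round.add(diff[idx][0])
--
--     for i in range(0, len(abilities), 2):
--         if i//2+1 in select_round:
--             result += abilities[i]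
--         else:
--             result += abilities[i+1]
--
--     return result
-- ===== SOURCE B (Python) =====
-- def solution(abilities, k):
--     # Like the original, mutates `abilities` in place (pad with 0 if odd, sort descending).
--     if len(abilities) & 1:
--         abilities.append(0)
--     abilities.sort(reverse=True)
--     result = 0
--     diffs = []
--     it = iter(abilities)
--     for hi, lo in zip(it, it):      # adjacent (winner, loser) pairs, one pass
--         result += lo
--         diffs.append(hi - lo)
--     for _ in range(k):              # k rounds of greedy extract-max (no second sort, no set)
--         m = max(diffs)              # raises ValueError when k exceeds the number of pairs
--         result += m
--         diffs.remove(m)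
--     return result
-- ===== Notes on version B (the rewrite author's own statement) =====
-- stated objective: alternative
-- what changed: B replaces A's round-numbered diff list, descending diff sort, top-k round set and second indexed selection pass by one structural pass over adjacent pairs (zip) that accumulates the losers' sum and the raw diffs, followed by k rounds of greedy extract-max (max + remove) on the diff list; it trades A's O(n log n) diff sort for O(n*k) greedy selection, and preserves A's in-place mutation of abilities (pad + sort).
import Mathlib
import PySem

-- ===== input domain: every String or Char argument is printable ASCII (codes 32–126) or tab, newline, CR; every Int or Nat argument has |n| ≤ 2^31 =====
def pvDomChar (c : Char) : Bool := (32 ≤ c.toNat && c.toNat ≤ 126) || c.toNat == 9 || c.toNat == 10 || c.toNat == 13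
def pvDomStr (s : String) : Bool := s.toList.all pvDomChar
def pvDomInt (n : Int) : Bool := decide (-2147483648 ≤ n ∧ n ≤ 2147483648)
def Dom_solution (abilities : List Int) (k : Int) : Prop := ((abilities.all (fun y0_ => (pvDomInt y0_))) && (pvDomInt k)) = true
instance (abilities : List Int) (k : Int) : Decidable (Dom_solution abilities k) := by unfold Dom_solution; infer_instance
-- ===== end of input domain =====

-- B replaces A's round-numbered diff list + diff sort + top-k round set + second indexed pass
-- by one structural pass over adjacent pairs (losers' sum + raw diffs) and k rounds of greedy
-- extract-max (max + remove) on the diff list; same in-place mutation of abilities (pad + sort),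
-- the equivalence proved here is about the return value.

-- ===== PORT A =====
def solution (abilities : List Int) (k : Int) : Int :=
  -- `if len(abilities) & 1:` — len & 1 is 1 exactly when the length is odd
  let ab0 := if abilities.length % 2 = 1 then abilities ++ [(0 : Int)] else abilities
  let ab := PySem.List.sorted ab0 (fun x => x) true
  let diff := (PySem.List.pyRange 0 (PySem.List.len ab) 2).foldl
    (fun acc i => acc ++ [(PySem.Int.floordiv i 2 + 1,
        |PySem.List.pyGetD ab (i + 1) 0 - PySem.List.pyGetD ab i 0|)]) []
  let diffS := PySem.List.sorted diff (fun x => -x.2) false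
  let sel := (PySem.List.pyRange 0 k 1).foldl
    (fun s idx => PySem.Set.add s (PySem.List.pyGetD diffS idx ((0 : Int), (0 : Int))).1)
    (PySem.Set.empty : PySem.Set Int)
  (PySem.List.pyRange 0 (PySem.List.len ab) 2).foldl
    (fun r i => if PySem.Set.contains sel (PySem.Int.floordiv i 2 + 1)
                then r + PySem.List.pyGetD ab i 0
                else r + PySem.List.pyGetD ab (i + 1) 0) 0

-- ===== PORT B =====
-- `for hi, lo in zip(it, it)`: consume the list two elements at a time, accumulating
-- result (+ lo) and appending hi - lo to diffs; a trailing odd element is dropped (as zip does).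
def pvPairGo (l : List Int) (res : Int) (diffs : List Int) : Int × List Int :=
  match l with
  | hi :: lo :: rest => pvPairGo rest (res + lo) (diffs ++ [hi - lo])
  | _ => (res, diffs)

def solution_alt (abilities : List Int) (k : Int) : Int :=
  let ab0 := if abilities.length % 2 = 1 then abilities ++ [(0 : Int)] else abilities
  let ab := PySem.List.sorted ab0 (fun x => x) true
  let st0 := pvPairGo ab 0 []
  -- `for _ in range(k): m = max(diffs); result += m; diffs.remove(m)`
  -- max(diffs) raises ValueError on an empty diffs (Pre_ excludes those inputs);
  -- the none branch is unreachable under Pre_ and leaves the state unchanged.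
  let stF := (PySem.List.pyRange 0 k 1).foldl
    (fun st _ => match PySem.List.max? st.2 (fun x => x) with
      | some m => (st.1 + m, (PySem.List.remove? st.2 m).getD st.2)
      | none => st) st0
  stF.1

-- ===== PRECONDITION & SPEC =====
-- A raises IndexError (diff[idx] with idx ≥ len(diff)) — and B raises ValueError (max of an
-- empty list) — exactly when k exceeds the number of pairs (len(abilities)+1)//2; Pre_
-- excludes exactly those inputs.
def Pre_solution (abilities : List Int) (k : Int) : Prop :=
  k ≤ (((abilities.length + 1) / 2 : Nat) : Int)
instance (abilities : List Int) (k : Int) : Decidable (Pre_solution abilities k) := by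
  unfold Pre_solution; infer_instance
def pvWitness_solution : List Int × Int := ([5, 3, 2], 1)

def Spec_solution (abilities : List Int) (k : Int) (out : Int) : Prop := out = solution_alt abilities k
instance (abilities : List Int) (k : Int) (out : Int) : Decidable (Spec_solution abilities k out) := by
  unfold Spec_solution; infer_instance

-- ===== CLAIM (what is proved, stated in full; the proofs are below) =====
def Claim_equal_solution : Prop := ∀ (abilities : List Int) (k : Int), Dom_solution abilities k → Pre_solution abilities k → Spec_solution abilities k (solution abilities k)

-- ===== LEMMAS AND PROOFS =====

-- range(0, 2m, 2) enumerated
lemma pyRange_step2 (m : Nat) :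
    PySem.List.pyRange 0 (2 * (m : Int)) 2 = (List.range m).map (fun (j : Nat) => 2 * (j : Int)) := by
  rw [PySem.List.pyRange_of_pos _ _ (by norm_num)]
  have h2 : ((2 * (m : Int) - 0 + 2 - 1) / 2).toNat = m := by omega
  rcases Nat.eq_zero_or_pos m with hm | hm
  · subst hm; simp
  · have hpos : (0 : Int) < 2 * (m : Int) := by positivity
    rw [if_pos hpos, h2]
    exact List.map_congr_left (fun j _ => by ring)

-- sum over range m of (if j = j0 then c else 0) = c for j0 < m
lemma sum_range_single (m j0 : Nat) (c : Int) (h : j0 < m) :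
    ((List.range m).map (fun (j : Nat) => if j = j0 then c else 0)).sum = c := by
  induction m with
  | zero => omega
  | succ m ih =>
    rw [List.range_succ, List.map_append, List.sum_append]
    rcases Nat.lt_or_ge j0 m with h' | h'
    · have hne : m ≠ j0 := by omega
      simp [ih h', hne]
    · have hj : j0 = m := by omega
      subst hj
      have hz : ∀ j ∈ List.range j0, (if j = j0 then c else 0) = 0 := by
        intro j hj'; simp at hj'; simp [Nat.ne_of_lt hj']
      rw [List.map_congr_left hz]
      simp

-- the selection sum: distinct selected rounds, each naming one pair's diff
lemma sum_sel (m : Nat) (d : Nat → Int) (T : List (Int × Int))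
    (hT : ∀ p ∈ T, ∃ j, j < m ∧ p = ((j : Int) + 1, d j))
    (hnd : (T.map Prod.fst).Nodup) :
    ((List.range m).map (fun (j : Nat) => if ((j : Int) + 1) ∈ T.map Prod.fst then d j else 0)).sum
      = (T.map Prod.snd).sum := by
  induction T with
  | nil => simp
  | cons p T' ih =>
    obtain ⟨j0, hj0, hp⟩ := hT p (List.mem_cons_self)
    rw [List.map_cons, List.nodup_cons] at hnd
    obtain ⟨hp1, hnd'⟩ := hnd
    have key : ∀ j ∈ List.range m,
        (if ((j : Int) + 1) ∈ (p :: T').map Prod.fst then d j else 0)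
          = (if ((j : Int) + 1) ∈ T'.map Prod.fst then d j else 0) + (if j = j0 then d j0 else 0) := by
      intro j _
      rcases eq_or_ne j j0 with hj | hj
      · subst hj
        have hmem : ((j : Int) + 1) ∈ (p :: T').map Prod.fst := by
          rw [List.map_cons, List.mem_cons]; left; rw [hp]
        have hnot : ((j : Int) + 1) ∉ T'.map Prod.fst := by
          have hfst : p.1 = (j : Int) + 1 := by rw [hp]
          rw [← hfst]; exact hp1
        rw [if_pos hmem, if_neg hnot, if_pos rfl]; ring
      · have hne : ((j : Int) + 1) ≠ p.1 := by
          rw [hp]; intro hc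
          have hcast : (j : Int) = (j0 : Int) := by omega
          exact hj (by exact_mod_cast hcast)
        have hiff : (((j : Int) + 1) ∈ (p :: T').map Prod.fst) ↔ (((j : Int) + 1) ∈ T'.map Prod.fst) := by
          rw [List.map_cons, List.mem_cons]
          constructor
          · rintro (h | h)
            · exact absurd h hne
            · exact h
          · exact Or.inr
        rw [if_congr hiff rfl rfl, if_neg hj]; ring
    rw [List.map_congr_left key, PySem.List.sum_map_add_int,
        sum_range_single m j0 (d j0) hj0,
        ih (fun q hq => hT q (List.mem_cons_of_mem _ hq)) hnd']
    rw [hp, List.map_cons, List.sum_cons]; ring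

-- A's value equals base (sum of the smaller pair members) + sum of the k largest pair diffs
lemma core (ab : List Int) (k : Int) (m : Nat) (hlen : ab.length = 2 * m)
    (hsorted : ab.Pairwise (fun a b => b ≤ a)) (hk : k.toNat ≤ m) :
    (let diff := (PySem.List.pyRange 0 (PySem.List.len ab) 2).foldl
        (fun acc i => acc ++ [(PySem.Int.floordiv i 2 + 1,
            |PySem.List.pyGetD ab (i + 1) 0 - PySem.List.pyGetD ab i 0|)]) []
     let diffS := PySem.List.sorted diff (fun x => -x.2) false
     let sel := (PySem.List.pyRange 0 k 1).foldl
        (fun s idx => PySem.Set.add s (PySem.List.pyGetD diffS idx ((0 : Int), (0 : Int))).1)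
        (PySem.Set.empty : PySem.Set Int)
     (PySem.List.pyRange 0 (PySem.List.len ab) 2).foldl
        (fun r i => if PySem.Set.contains sel (PySem.Int.floordiv i 2 + 1)
                    then r + PySem.List.pyGetD ab i 0
                    else r + PySem.List.pyGetD ab (i + 1) 0) 0)
    = ((List.range m).map (fun j => ab.getD (2 * j + 1) 0)).sum
      + ((PySem.List.sorted ((List.range m).map
            (fun j => ab.getD (2 * j) 0 - ab.getD (2 * j + 1) 0)) (fun x => x) true).take k.toNat).sum := by
  dsimp only
  have hlenI : PySem.List.len ab = 2 * (m : Int) := by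
    rw [PySem.List.len_eq, hlen]; push_cast; ring
  have hfd : ∀ j : Nat, PySem.Int.floordiv (2 * (j : Int)) 2 = (j : Int) := by
    intro j
    rw [PySem.Int.floordiv_eq_ediv_of_pos (by norm_num)]
    omega
  have hg1 : ∀ j : Nat, PySem.List.pyGetD ab (2 * (j : Int)) 0 = ab.getD (2 * j) 0 := by
    intro j
    rw [show (2 * (j : Int)) = ((2 * j : Nat) : Int) by push_cast; ring, PySem.List.pyGetD_natCast]
  have hg2 : ∀ j : Nat, PySem.List.pyGetD ab (2 * (j : Int) + 1) 0 = ab.getD (2 * j + 1) 0 := by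
    intro j
    rw [show (2 * (j : Int) + 1) = ((2 * j + 1 : Nat) : Int) by push_cast; ring,
        PySem.List.pyGetD_natCast]
  have hord : ∀ j, j < m → ab.getD (2 * j + 1) 0 ≤ ab.getD (2 * j) 0 := by
    intro j hj
    have h1 : 2 * j < ab.length := by omega
    have h2 : 2 * j + 1 < ab.length := by omega
    rw [List.getD_eq_getElem ab 0 h1, List.getD_eq_getElem ab 0 h2]
    exact List.pairwise_iff_getElem.mp hsorted _ _ h1 h2 (by omega)
  set d : Nat → Int := fun j => ab.getD (2 * j) 0 - ab.getD (2 * j + 1) 0 with hd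
  set dl : List (Int × Int) := (List.range m).map (fun (j : Nat) => ((j : Int) + 1, d j)) with hdl
  have hdiff : (PySem.List.pyRange 0 (PySem.List.len ab) 2).foldl
      (fun acc i => acc ++ [(PySem.Int.floordiv i 2 + 1,
          |PySem.List.pyGetD ab (i + 1) 0 - PySem.List.pyGetD ab i 0|)]) [] = dl := by
    rw [hlenI, pyRange_step2, List.foldl_map, PySem.List.foldl_append_singleton_eq_map,
        List.nil_append, hdl]
    apply List.map_congr_left
    intro j hj
    rw [List.mem_range] at hj
    rw [hfd j, hg1 j, hg2 j, hd]
    have : |ab.getD (2 * j + 1) 0 - ab.getD (2 * j) 0| = ab.getD (2 * j) 0 - ab.getD (2 * j + 1) 0 := by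
      rw [abs_sub_comm]
      exact abs_of_nonneg (by have := hord j hj; omega)
    rw [this]
  rw [hdiff]
  set diffS : List (Int × Int) := PySem.List.sorted dl (fun x => -x.2) false with hdiffS
  have hlenS : diffS.length = m := by
    rw [hdiffS, PySem.List.length_sorted, hdl, List.length_map, List.length_range]
  have hmemS : ∀ p ∈ diffS, ∃ j, j < m ∧ p = ((j : Int) + 1, d j) := by
    intro p hp
    rw [hdiffS, PySem.List.mem_sorted, hdl, List.mem_map] at hp
    obtain ⟨j, hj, hpj⟩ := hp
    exact ⟨j, List.mem_range.mp hj, hpj.symm⟩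
  set t : Nat := k.toNat with ht
  have htake : (List.range t).map (fun (idx : Nat) => diffS.getD idx ((0 : Int), (0 : Int))) = diffS.take t := by
    apply List.ext_getElem
    · rw [List.length_map, List.length_range, List.length_take, hlenS]
      omega
    · intro i hi1 hi2
      rw [List.length_map, List.length_range] at hi1
      have hiS : i < diffS.length := by omega
      rw [List.getElem_map, List.getElem_range, List.getElem_take, List.getD_eq_getElem _ _ hiS]
  have hsel : (PySem.List.pyRange 0 k 1).foldl
      (fun s idx => PySem.Set.add s (PySem.List.pyGetD diffS idx ((0 : Int), (0 : Int))).1)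
      (PySem.Set.empty : PySem.Set Int)
      = PySem.Set.ofList ((diffS.take t).map Prod.fst) := by
    rw [PySem.List.pyRange_one, show ((k : Int) - 0).toNat = t by omega]
    rw [List.foldl_map]
    have hb : ∀ (s : PySem.Set Int), ∀ idx ∈ List.range t,
        PySem.Set.add s (PySem.List.pyGetD diffS (0 + (idx : Int)) ((0 : Int), (0 : Int))).1
          = PySem.Set.add s ((diffS.getD idx ((0 : Int), (0 : Int))).1) := by
      intro s idx _
      rw [show (0 + (idx : Int)) = ((idx : Nat) : Int) by ring, PySem.List.pyGetD_natCast]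
    rw [PySem.List.foldl_congr_mem _ _ _ _ hb]
    rw [show (List.foldl (fun s idx => PySem.Set.add s ((diffS.getD idx ((0 : Int), (0 : Int))).1))
          (PySem.Set.empty : PySem.Set Int) (List.range t))
        = List.foldl PySem.Set.add (PySem.Set.empty : PySem.Set Int)
            ((List.range t).map (fun (idx : Nat) => (diffS.getD idx ((0 : Int), (0 : Int))).1)) from
      (List.foldl_map (f := fun (idx : Nat) => (diffS.getD idx ((0 : Int), (0 : Int))).1)
        (g := PySem.Set.add)).symm]
    rw [show (List.range t).map (fun (idx : Nat) => (diffS.getD idx ((0 : Int), (0 : Int))).1)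
        = ((List.range t).map (fun (idx : Nat) => diffS.getD idx ((0 : Int), (0 : Int)))).map Prod.fst by
      rw [List.map_map]; rfl]
    rw [htake, PySem.Set.ofList_eq_foldl]
    rfl
  rw [hsel]
  have hndfst : ((diffS.take t).map Prod.fst).Nodup := by
    have hperm : (diffS.map Prod.fst).Perm (dl.map Prod.fst) :=
      (PySem.List.sorted_perm dl (fun x => -x.2) false).map Prod.fst
    have hnd_dl : (dl.map Prod.fst).Nodup := by
      rw [hdl, List.map_map]
      exact List.Nodup.map (fun a b hab => by
        simp only [Function.comp_apply] at hab
        omega) (List.nodup_range)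
    have hnodupS : (diffS.map Prod.fst).Nodup := hperm.nodup_iff.mpr hnd_dl
    rw [List.map_take]
    exact (List.take_sublist t _).nodup hnodupS
  have hsnd : diffS.map Prod.snd
      = PySem.List.sorted ((List.range m).map d) (fun x => x) true := by
    apply List.Perm.eq_of_pairwise (le := fun a b : Int => b ≤ a)
    · intro a b _ _ h1 h2; omega
    · exact (List.pairwise_map.mpr ((PySem.List.sorted_pairwise dl (fun x => -x.2)).imp
        (fun h => by omega)))
    · exact PySem.List.sorted_pairwise_rev _ _
    · refine (((PySem.List.sorted_perm dl (fun x => -x.2) false).map Prod.snd).trans ?_).trans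
        (PySem.List.sorted_perm _ _ _).symm
      rw [hdl, List.map_map]
      exact List.Perm.refl _
  rw [hlenI, pyRange_step2]
  rw [List.foldl_map]
  have hbody : ∀ (r : Int), ∀ j ∈ List.range m,
      (if PySem.Set.contains (PySem.Set.ofList ((diffS.take t).map Prod.fst))
            (PySem.Int.floordiv (2 * (j : Int)) 2 + 1)
       then r + PySem.List.pyGetD ab (2 * (j : Int)) 0
       else r + PySem.List.pyGetD ab (2 * (j : Int) + 1) 0)
      = r + (ab.getD (2 * j + 1) 0
             + (if ((j : Int) + 1) ∈ (diffS.take t).map Prod.fst then d j else 0)) := by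
    intro r j hj
    rw [List.mem_range] at hj
    rw [hfd j, hg1 j, hg2 j]
    have hiff : (PySem.Set.contains (PySem.Set.ofList ((diffS.take t).map Prod.fst))
        ((j : Int) + 1) = true) ↔ (((j : Int) + 1) ∈ (diffS.take t).map Prod.fst) := by
      simp [PySem.Set.contains, PySem.Set.mem_ofList]
    rw [if_congr hiff rfl rfl]
    split_ifs with h
    · rw [hd]; ring
    · ring
  rw [PySem.List.foldl_congr_mem _ _ _ _ hbody, PySem.List.foldl_add]
  rw [PySem.List.sum_map_add_int,
      sum_sel m d (diffS.take t) (fun p hp => hmemS p (List.mem_of_mem_take hp)) hndfst]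
  rw [← hsnd, ← List.map_take]
  ring

-- pairs of adjacent elements, structurally (the shape zip(it, it) walks)
def pairsOf : List Int → List (Int × Int)
  | hi :: lo :: rest => (hi, lo) :: pairsOf rest
  | _ => []

-- pvPairGo computes the losers' sum and the diff list of pairsOf
lemma pvPairGo_spec (l : List Int) (res : Int) (diffs : List Int) :
    pvPairGo l res diffs
      = (res + ((pairsOf l).map Prod.snd).sum,
         diffs ++ (pairsOf l).map (fun p => p.1 - p.2)) := by
  induction l using pairsOf.induct generalizing res diffs with
  | case1 hi lo rest ih =>
    rw [pvPairGo, pairsOf, ih]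
    simp only [List.map_cons, List.sum_cons, List.append_assoc, List.singleton_append]
    exact congrArg₂ Prod.mk (by ring) rfl
  | case2 l h =>
    cases l with
    | nil => simp [pvPairGo, pairsOf]
    | cons x t =>
      cases t with
      | nil => simp [pvPairGo, pairsOf]
      | cons y r => exact absurd rfl (h x y r)

-- pairsOf of an even-length list, indexed
lemma pairsOf_eq (m : Nat) (l : List Int) (hlen : l.length = 2 * m) :
    pairsOf l = (List.range m).map (fun j => (l.getD (2 * j) 0, l.getD (2 * j + 1) 0)) := by
  induction m generalizing l with
  | zero =>
    have : l = [] := List.length_eq_zero_iff.mp (by omega)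
    subst this; rfl
  | succ m ih =>
    match l, hlen with
    | hi :: lo :: rest, hlen =>
      have hr : rest.length = 2 * m := by
        simp only [List.length_cons] at hlen; omega
      rw [pairsOf, ih rest hr, List.range_succ_eq_map, List.map_cons, List.map_map]
      refine congrArg₂ _ rfl (List.map_congr_left fun j _ => ?_)
      simp only [Function.comp_apply, show 2 * j.succ = 2 * j + 1 + 1 from by omega,
        List.getD_cons_succ]

-- a foldl whose step ignores the element is iteration
lemma foldl_const_iter {α β : Type} (g : α → α) (st : α) (l : List β) :
    l.foldl (fun s _ => g s) st = g^[l.length] st := by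
  induction l generalizing st with
  | nil => rfl
  | cons x xs ih => rw [List.foldl_cons, ih, List.length_cons, Function.iterate_succ_apply]

-- descending sort of a nonempty list is its max followed by the sort of the rest
lemma sorted_desc_cons_max (ds : List Int) (mx : Int)
    (hmx : PySem.List.max? ds (fun x => x) = some mx) :
    PySem.List.sorted ds (fun x => x) true = mx :: PySem.List.sorted (ds.erase mx) (fun x => x) true := by
  have hmem : mx ∈ ds := PySem.List.max?_mem hmx
  have hmax : ∀ y ∈ ds, y ≤ mx := fun y hy => PySem.List.max?_isMax hmx y hy
  have hperm : (PySem.List.sorted ds (fun x => x) true).Perm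
      (mx :: PySem.List.sorted (ds.erase mx) (fun x => x) true) := by
    refine (PySem.List.sorted_perm ds (fun x => x) true).trans ?_
    refine (List.perm_cons_erase hmem).trans ?_
    exact List.Perm.cons mx (PySem.List.sorted_perm (ds.erase mx) (fun x => x) true).symm
  refine PySem.List.eq_of_perm_of_pairwise_le_of_injective (fun x : Int => -x)
    (fun a b hab => neg_injective hab) hperm ?_ ?_
  · exact (PySem.List.sorted_pairwise_rev ds (fun x => x)).imp (fun h => by simpa using neg_le_neg h)
  · rw [List.pairwise_cons]
    refine ⟨fun y hy => ?_, (PySem.List.sorted_pairwise_rev _ (fun x => x)).imp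
      (fun h => by simpa using neg_le_neg h)⟩
    have h1 : y ∈ ds.erase mx := (PySem.List.mem_sorted _ _ _ _).mp hy
    simpa using neg_le_neg (hmax y (List.mem_of_mem_erase h1))

-- t rounds of extract-max add the sum of the t largest elements
lemma extract_iter (t : Nat) (ds : List Int) (b : Int) (ht : t ≤ ds.length) :
    ((fun st : Int × List Int => match PySem.List.max? st.2 (fun x => x) with
        | some m => (st.1 + m, (PySem.List.remove? st.2 m).getD st.2)
        | none => st)^[t] (b, ds)).1
      = b + ((PySem.List.sorted ds (fun x => x) true).take t).sum := by
  induction t generalizing ds b with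
  | zero => simp
  | succ t ih =>
    have hne : ds ≠ [] := by intro h; subst h; simp at ht
    obtain ⟨mx, hmx⟩ : ∃ mx, PySem.List.max? ds (fun x => x) = some mx := by
      cases h : PySem.List.max? ds (fun x => x) with
      | none => exact absurd ((PySem.List.max?_eq_none_iff _ _).mp h) hne
      | some m => exact ⟨m, rfl⟩
    have hmem : mx ∈ ds := PySem.List.max?_mem hmx
    have hrem : PySem.List.remove? ds mx = some (ds.erase mx) :=
      PySem.List.remove?_eq_some_erase ds mx hmem
    rw [Function.iterate_succ_apply]
    simp only [hmx, hrem, Option.getD_some]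
    have hlen : t ≤ (ds.erase mx).length := by
      rw [List.length_erase_of_mem hmem]; omega
    rw [ih (ds.erase mx) (b + mx) hlen, sorted_desc_cons_max ds mx hmx, List.take_succ_cons,
        List.sum_cons]
    ring

-- ===== VERDICT (by name: the statement is the Claim_ definition above) =====
theorem solution_spec : Claim_equal_solution := by
  intro abilities k _ hpre
  unfold Pre_solution at hpre
  unfold Spec_solution solution solution_alt
  dsimp only
  set ab0 := if abilities.length % 2 = 1 then abilities ++ [(0 : Int)] else abilities with hab0
  set m := (abilities.length + 1) / 2 with hm
  have hab0len : ab0.length = 2 * m := by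
    by_cases h : abilities.length % 2 = 1 <;> simp [hab0, h] <;> omega
  set ab := PySem.List.sorted ab0 (fun x => x) true with hab
  have hablen : ab.length = 2 * m := by rw [hab, PySem.List.length_sorted]; exact hab0len
  have hkt : k.toNat ≤ m := by omega
  rw [core ab k m hablen (PySem.List.sorted_pairwise_rev ab0 (fun x => x)) hkt]
  -- B's side
  rw [pvPairGo_spec, pairsOf_eq m ab hablen]
  rw [foldl_const_iter, PySem.List.length_pyRange_one, show ((k : Int) - 0).toNat = k.toNat by omega]
  rw [extract_iter k.toNat _ _ (by
    simp only [List.nil_append, List.length_map, List.length_range]; omega)]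
  simp only [List.map_map, Function.comp_def, List.nil_append]
  ring
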